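-- pv_equiv track=rewrite | github.com/limyunkai19/competitive-programming-codes | Katties/insert.py | solve
-- ===== SOURCE A (Python) =====
-- dp_nCk = [[-1 for i in range(51)] for i in range(101)]
--
-- def nCk(n, k):
--     if dp_nCk[n][k] != -1:
--         return dp_nCk[n][k]
--     if n == k or k == 0:
--         dp_nCk[n][k] = 1
--         return 1
--
--     dp_nCk[n][k] = nCk(n-1, k-1)+nCk(n-1, k)
--     return dp_nCk[n][k]
--
-- def cross(x, y):
--     if x < y:
--         x, y = y, x
--
--     # x+y choose y
--     return nCk(x+y, y)
--
-- def solve(tree):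
--     if len(tree) <= 1:
--         return 1
--
--     root, left, right = tree[0], [], []
--
--     for i in range(1, len(tree)):
--         if tree[i] < root:
--             left.append(tree[i])
--         else:
--             right.append(tree[i])
--
--     ans = solve(left)*solve(right)*cross(len(left), len(right))
--
--     return ans
-- ===== SOURCE B (Python) =====
-- def solve(tree):
--     # Closed form: n! // product of all subtree sizes of the BST built by A's rule.
--     root = None  # node = [value, left, right]
--     for v in tree:
--         if root is None:
--             root = [v, None, None]
--             continue
--         cur = root
--         while True:
--             i = 1 if v < cur[0] else 2
--             if cur[i] is None:
--                 cur[i] = [v, None, None]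
--                 break
--             cur = cur[i]
--
--     def size_prod(node):
--         # returns (subtree size, product of subtree sizes within it)
--         if node is None:
--             return 0, 1
--         sl, pl = size_prod(node[1])
--         sr, pr = size_prod(node[2])
--         s = 1 + sl + sr
--         return s, s * pl * pr
--
--     _, prod = size_prod(root)
--     fact = 1
--     for i in range(2, len(tree) + 1):
--         fact *= i
--     return fact // prod
-- ===== Notes on version B (the rewrite author's own statement) =====
-- stated objective: simpler
-- what changed: Replaces A's recursive partition with memoized-binomial combination by the closed form n! // (product of all subtree sizes) computed over an explicitly built BST in one insertion pass plus one size pass.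
-- crash fix: On any tree of length >= 102 A raises IndexError (its memo table dp_nCk has only 101 rows); B returns the correct count there. — e.g. on solve([0, 1, 2, 3, 4, 5, 6, 7, 8, 9, 10, 11, 12, 13, 14, 15, 16, 17, 18, 19, 20, 21, 22, 23, 24, 25, 26, 27, 28, 29, 30, 31, …): A raises IndexError, B returns 1
import Mathlib
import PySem

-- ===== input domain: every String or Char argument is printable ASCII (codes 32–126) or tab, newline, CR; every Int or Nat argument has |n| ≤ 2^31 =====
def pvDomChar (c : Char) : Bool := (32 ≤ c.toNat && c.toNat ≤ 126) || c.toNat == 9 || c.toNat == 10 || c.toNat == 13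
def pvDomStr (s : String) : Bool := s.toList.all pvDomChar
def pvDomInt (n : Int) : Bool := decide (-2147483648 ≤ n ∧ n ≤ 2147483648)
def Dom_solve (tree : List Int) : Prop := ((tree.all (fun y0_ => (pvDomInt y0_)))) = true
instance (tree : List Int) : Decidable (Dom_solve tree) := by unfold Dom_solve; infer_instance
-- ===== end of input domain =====

-- B replaces A's recursive partition-and-binomial recursion by the closed form
-- n! // (product of subtree sizes of the BST built by A's insertion rule) — simpler, one tree pass.

-- ===== PORT A =====
-- nCk's memo table only speeds Python up; the port is the same recursion, made total
-- with a fuel argument that never runs out on the calls A makes (n decreases by 1 each step).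
def nCkF : Nat → Int → Int → Int
  | 0, _, _ => 1
  | fuel+1, n, k =>
    if n = k ∨ k = 0 then 1
    else nCkF fuel (n-1) (k-1) + nCkF fuel (n-1) k

def crossA (x y : Int) : Int :=
  let p := if x < y then (y, x) else (x, y)
  nCkF ((p.1 + p.2).toNat + 1) (p.1 + p.2) p.2

def solve (tree : List Int) : Int :=
  if _h : tree.length ≤ 1 then 1
  else
    match tree with
    | [] => 1
    | root :: rest =>
      -- A's loop appends tree[i] to `left` when tree[i] < root, else to `right`
      let left := rest.filter (fun x => decide (x < root))
      let right := rest.filter (fun x => !decide (x < root))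
      solve left * solve right * crossA (left.length : Int) (right.length : Int)
termination_by tree.length
decreasing_by
  all_goals
    simp only [List.length_unattach, List.length_cons]
    exact Nat.lt_succ_of_le ((List.length_filter_le _ _).trans (by simp))

-- ===== PORT B =====
inductive BTree where
  | leaf : BTree
  | node : Int → BTree → BTree → BTree

-- Python walks down with a cursor mutating the node list; structurally: descend and rebuild.
def bInsert (v : Int) : BTree → BTree
  | .leaf => .node v .leaf .leaf
  | .node r l rt => if v < r then .node r (bInsert v l) rt else .node r l (bInsert v rt)

-- Python's `size_prod` returns the size and (via the accumulated product) the product of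
-- subtree sizes; ported as a pair (size, product).
def bSizeProd : BTree → Int × Int
  | .leaf => (0, 1)
  | .node _ l r =>
    let sl := bSizeProd l
    let sr := bSizeProd r
    (1 + sl.1 + sr.1, (1 + sl.1 + sr.1) * (sl.2 * sr.2))

def solve_alt (tree : List Int) : Int :=
  let root := tree.foldl (fun t v => bInsert v t) .leaf
  let prod := (bSizeProd root).2
  let fact := (PySem.List.pyRange 2 ((tree.length : Int) + 1) 1).foldl (· * ·) 1
  PySem.Int.floordiv fact prod

-- ===== PRECONDITION & SPEC =====
-- A's memo table dp_nCk has only 101 rows, so A raises IndexError on any tree of length ≥ 102;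
-- Pre_ excludes exactly those inputs (A returns normally on every shorter tree).
def Pre_solve (tree : List Int) : Prop := tree.length ≤ 101
instance (tree : List Int) : Decidable (Pre_solve tree) := by unfold Pre_solve; infer_instance
def pvWitness_solve : List Int := [3, 1, 2, 3]

-- A raises IndexError on every tree of length ≥ 102; B returns the count there.
def Raises_solve (tree : List Int) : Prop := 102 ≤ tree.length
instance (tree : List Int) : Decidable (Raises_solve tree) := by unfold Raises_solve; infer_instance
def pvRaiseWitness_solve : List Int := [0, 1, 2, 3, 4, 5, 6, 7, 8, 9, 10, 11, 12, 13, 14, 15, 16, 17, 18, 19, 20, 21, 22, 23, 24, 25, 26, 27, 28, 29, 30, 31, 32, 33, 34, 35, 36, 37, 38, 39, 40, 41, 42, 43, 44, 45, 46, 47, 48, 49, 50, 51, 52, 53, 54, 55, 56, 57, 58, 59, 60, 61, 62, 63, 64, 65, 66, 67, 68, 69, 70, 71, 72, 73, 74, 75, 76, 77, 78, 79, 80, 81, 82, 83, 84, 85, 86, 87, 88, 89, 90, 91, 92, 93, 94, 95, 96, 97, 98, 99, 100, 101]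
def pvRaiseWitnessOut_solve : Int := 1

def Spec_solve (tree : List Int) (out : Int) : Prop := out = solve_alt tree
instance (tree : List Int) (out : Int) : Decidable (Spec_solve tree out) := by unfold Spec_solve; infer_instance

-- ===== CLAIM (what is proved, stated in full; the proofs are below) =====
def Claim_equal_solve : Prop := ∀ (tree : List Int), Dom_solve tree → Pre_solve tree → Spec_solve tree (solve tree)
def Claim_raises_solve : Prop := (∀ (tree : List Int), Dom_solve tree → Raises_solve tree → ¬ Pre_solve tree) ∧ (Dom_solve (pvRaiseWitness_solve) ∧ Raises_solve (pvRaiseWitness_solve) ∧ solve_alt (pvRaiseWitness_solve) = pvRaiseWitnessOut_solve)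

-- ===== LEMMAS AND PROOFS =====

-- A's nCk computes the binomial coefficient (given enough fuel, which A's calls always have).
theorem nCkF_choose : ∀ (fuel : Nat) (n k : Nat), n < fuel → k ≤ n →
    nCkF fuel (n : Int) (k : Int) = ((n.choose k : Nat) : Int) := by
  intro fuel
  induction fuel with
  | zero => omega
  | succ f ih =>
    intro n k hn hk
    by_cases h : (n : Int) = (k : Int) ∨ (k : Int) = 0
    · have : n = k ∨ k = 0 := by omega
      rcases this with h' | h' <;> simp [nCkF, h', Nat.choose_self]
    · have hkn : k < n := by omega
      have hk0 : 0 < k := by omega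
      obtain ⟨m, rfl⟩ : ∃ m, n = m + 1 := ⟨n - 1, by omega⟩
      obtain ⟨j, rfl⟩ : ∃ j, k = j + 1 := ⟨k - 1, by omega⟩
      have e1 : ((m : Int) + 1) - 1 = (m : Int) := by ring
      have e2 : ((j : Int) + 1) - 1 = (j : Int) := by ring
      rw [nCkF, if_neg h]
      push_cast
      have iha := ih m j (by omega) (by omega)
      have ihb := ih m (j+1) (by omega) (by omega)
      push_cast at ihb
      rw [e1, e2, iha, ihb]
      rw [Nat.choose_succ_succ]
      push_cast
      ring

theorem crossA_choose (a b : Nat) :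
    crossA (a : Int) (b : Int) = (((a + b).choose b : Nat) : Int) := by
  by_cases h : (a : Int) < (b : Int)
  · have hab : a < b := by exact_mod_cast h
    have : crossA (a : Int) (b : Int) = nCkF (((b : Int) + (a : Int)).toNat + 1) ((b : Int) + (a : Int)) (a : Int) := by
      simp [crossA, h]
    rw [this]
    have e : (b : Int) + (a : Int) = ((b + a : Nat) : Int) := by push_cast; ring
    rw [e]
    rw [nCkF_choose _ (b + a) a (by omega) (by omega)]
    have : (b + a).choose a = (a + b).choose b := by
      rw [Nat.add_comm b a]
      rw [← Nat.choose_symm (by omega : b ≤ a + b)]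
      congr 1
      omega
    rw [this]
  · have : crossA (a : Int) (b : Int) = nCkF (((a : Int) + (b : Int)).toNat + 1) ((a : Int) + (b : Int)) (b : Int) := by
      simp [crossA, h]
    rw [this]
    have e : (a : Int) + (b : Int) = ((a + b : Nat) : Int) := by push_cast; ring
    rw [e]
    rw [nCkF_choose _ (a + b) b (by omega) (by omega)]

-- folding inserts into a node sends each element to the side A's partition sends it to
theorem foldl_insert_node (xs : List Int) : ∀ (r : Int) (L R : BTree),
    xs.foldl (fun t v => bInsert v t) (.node r L R)
      = .node r ((xs.filter (fun x => decide (x < r))).foldl (fun t v => bInsert v t) L)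
               ((xs.filter (fun x => !decide (x < r))).foldl (fun t v => bInsert v t) R) := by
  induction xs with
  | nil => intro r L R; simp
  | cons v xs ih =>
    intro r L R
    by_cases h : v < r
    · simp [List.foldl_cons, bInsert, h, ih]
    · simp [List.foldl_cons, bInsert, h, ih]

theorem bBuild_cons (root : Int) (rest : List Int) :
    (root :: rest).foldl (fun t v => bInsert v t) .leaf
      = .node root ((rest.filter (fun x => decide (x < root))).foldl (fun t v => bInsert v t) .leaf)
                   ((rest.filter (fun x => !decide (x < root))).foldl (fun t v => bInsert v t) .leaf) := by
  simp [List.foldl_cons, bInsert, foldl_insert_node]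

theorem bSizeProd_pos : ∀ (t : BTree), 0 ≤ (bSizeProd t).1 ∧ 0 < (bSizeProd t).2 := by
  intro t
  induction t with
  | leaf => simp [bSizeProd]
  | node v l r ihl ihr =>
    simp only [bSizeProd]
    constructor
    · omega
    · have := mul_pos ihl.2 ihr.2
      nlinarith [ihl.1, ihr.1]

theorem bSizeProd_insert (v : Int) : ∀ (t : BTree),
    (bSizeProd (bInsert v t)).1 = (bSizeProd t).1 + 1 := by
  intro t
  induction t with
  | leaf => simp [bInsert, bSizeProd]
  | node r l rt ihl ihr =>
    by_cases h : v < r <;> simp [bInsert, h, bSizeProd] <;> omega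

theorem bSizeProd_foldl (xs : List Int) : ∀ (t : BTree),
    (bSizeProd (xs.foldl (fun t v => bInsert v t) t)).1 = (bSizeProd t).1 + xs.length := by
  induction xs with
  | nil => simp
  | cons v xs ih =>
    intro t
    simp [List.foldl_cons, ih, bSizeProd_insert]
    omega

-- the invariant behind the closed form: solve(xs) * (product of subtree sizes) = |xs|!
theorem solve_mul_prod : ∀ (n : Nat) (xs : List Int), xs.length ≤ n →
    solve xs * (bSizeProd (xs.foldl (fun t v => bInsert v t) .leaf)).2
      = ((xs.length.factorial : Nat) : Int) := by
  intro n
  induction n with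
  | zero =>
    intro xs h
    have : xs = [] := List.length_eq_zero_iff.mp (by omega)
    subst this; simp [solve, bSizeProd]
  | succ n ih =>
    intro xs hlen
    by_cases h1 : xs.length ≤ 1
    · match xs, h1 with
      | [], _ => simp [solve, bSizeProd]
      | [x], _ => simp [solve, bInsert, bSizeProd]
    · match xs, h1 with
      | root :: rest, h1 =>
        rw [solve, dif_neg h1, bBuild_cons]
        set left := rest.filter (fun x => decide (x < root)) with hL
        set right := rest.filter (fun x => !decide (x < root)) with hR
        have hsplit : left.length + right.length = rest.length := by
          rw [hL, hR]; exact (List.length_eq_length_filter_add (l := rest) (fun x => decide (x < root))).symm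
        have hlL : left.length ≤ n := by
          have := List.length_filter_le (fun x => decide (x < root)) rest
          simp only [List.length_cons] at hlen; omega
        have hlR : right.length ≤ n := by
          have := List.length_filter_le (fun x => !decide (x < root)) rest
          simp only [List.length_cons] at hlen; omega
        simp only [bSizeProd]
        rw [bSizeProd_foldl, bSizeProd_foldl]
        simp only [bSizeProd]
        have ihL := ih left hlL
        have ihR := ih right hlR
        rw [crossA_choose left.length right.length]
        have key := Nat.choose_mul_factorial_mul_factorial
          (show right.length ≤ left.length + right.length by omega)
        have e1 : left.length + right.length - right.length = left.length := by omega
        rw [e1] at key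
        have hfact : (root :: rest).length.factorial
            = (left.length + right.length + 1) * ((left.length + right.length).factorial) := by
          simp only [List.length_cons, ← hsplit]
          rw [Nat.factorial_succ]
        calc solve left * solve right * ((left.length + right.length).choose right.length : Int)
              * ((1 + ((0:Int) + left.length) + ((0:Int) + right.length))
                * ((bSizeProd (left.foldl (fun t v => bInsert v t) .leaf)).2
                  * (bSizeProd (right.foldl (fun t v => bInsert v t) .leaf)).2))
            = (((left.length + right.length).choose right.length : Int)
                * (right.length.factorial : Int) * (left.length.factorial : Int))
              * (1 + (left.length : Int) + (right.length : Int)) := by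
              rw [← ihL, ← ihR]; ring
          _ = ((root :: rest).length.factorial : Int) := by
              rw [show (((left.length + right.length).choose right.length : Nat) : Int)
                    * (right.length.factorial : Int) * (left.length.factorial : Int)
                  = (((left.length + right.length).choose right.length
                      * right.length.factorial * left.length.factorial : Nat) : Int) by push_cast; ring]
              rw [key, hfact]
              push_cast
              ring

-- the factorial loop of B
theorem fact_loop (n : Nat) :
    (PySem.List.pyRange 2 ((n : Int) + 1) 1).foldl (· * ·) 1 = ((n.factorial : Nat) : Int) := by
  induction n with
  | zero => rw [PySem.List.pyRange_one_eq_nil (by norm_num)]; simp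
  | succ m ih =>
    by_cases hm : m = 0
    · subst hm; rw [PySem.List.pyRange_one_eq_nil (by norm_num)]; simp
    · have h2 : (2 : Int) ≤ (m : Int) + 1 := by omega
      have : ((m + 1 : Nat) : Int) + 1 = ((m : Int) + 1) + 1 := by push_cast; ring
      rw [this, PySem.List.pyRange_one_succ_right h2, List.foldl_append, ih]
      simp only [List.foldl_cons, List.foldl_nil]
      rw [Nat.factorial_succ]
      push_cast
      ring

theorem solve_eq_alt (xs : List Int) : solve xs = solve_alt xs := by
  unfold solve_alt
  simp only []
  rw [fact_loop xs.length]
  have hmain := solve_mul_prod xs.length xs le_rfl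
  have hpos := (bSizeProd_pos (xs.foldl (fun t v => bInsert v t) .leaf)).2
  rw [← hmain, PySem.Int.floordiv_eq_ediv_of_pos hpos, Int.mul_ediv_cancel _ (by omega)]

-- ===== VERDICT (by name: the statement is the Claim_ definition above) =====
theorem solve_spec : Claim_equal_solve := by
  intro tree _ _
  unfold Spec_solve
  exact solve_eq_alt tree

set_option maxRecDepth 4096

@[simp]
theorem solve_raises : Claim_raises_solve := by
  unfold Claim_raises_solve
  constructor
  · intro tree _ hr
    unfold Raises_solve at hr
    unfold Pre_solve
    omega
  · exact ⟨by decide, by decide, by decide⟩
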